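-- pv_equiv track=rewrite | github.com/mindsdb/lightwood | lightwood/helpers/text.py | _is_foreign_key_name
-- ===== SOURCE A (Python) =====
-- def _is_foreign_key_name(name):
--     for endings in ['id', 'ID', 'Id']:
--         for add in ['-', '_', ' ']:
--             if name.endswith(add + endings):
--                 return True
--     for endings in ['ID', 'Id']:
--         if name.endswith(endings):
--             return True
--     return False
-- ===== SOURCE B (Python) =====
-- def _is_foreign_key_name(name):
--     # Single forward pass: a 6-state DFA over the characters recognises the
--     # suffix language {sep+'id', sep+'ID', sep+'Id', 'ID', 'Id'} (sep in '-_ ').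
--     # States: 0 other, 1 just saw a separator, 2 just saw 'I',
--     # 3 just saw sep+'i', 4 accept ('ID'/'Id' suffix), 5 accept (sep+'id' suffix).
--     state = 0
--     for c in name:
--         if c == 'I':
--             state = 2
--         elif c == 'i':
--             state = 3 if state == 1 else 0
--         elif c in '-_ ':
--             state = 1
--         elif c == 'D':
--             state = 4 if state == 2 else 0
--         elif c == 'd':
--             state = 4 if state == 2 else (5 if state == 3 else 0)
--         else:
--             state = 0
--     return state >= 4
-- ===== Notes on version B (the rewrite author's own statement) =====
-- stated objective: alternative
-- what changed: Replaces A's eleven endswith suffix probes with a single left-to-right pass that drives a six-state finite automaton recognising the suffix language {sep+id, sep+ID, sep+Id, ID, Id} and accepts iff the final state is accepting.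
import Mathlib
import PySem

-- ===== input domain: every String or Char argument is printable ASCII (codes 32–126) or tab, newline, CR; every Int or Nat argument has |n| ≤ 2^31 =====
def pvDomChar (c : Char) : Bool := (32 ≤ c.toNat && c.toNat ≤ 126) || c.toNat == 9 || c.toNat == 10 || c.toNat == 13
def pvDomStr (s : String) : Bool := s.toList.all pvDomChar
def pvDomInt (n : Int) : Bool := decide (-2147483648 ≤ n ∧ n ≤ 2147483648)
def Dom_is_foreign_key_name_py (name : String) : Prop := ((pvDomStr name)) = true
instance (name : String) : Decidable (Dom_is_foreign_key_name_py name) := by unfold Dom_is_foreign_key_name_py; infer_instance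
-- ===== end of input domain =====

-- B replaces A's eleven endswith probes with one forward pass driving a six-state DFA; objective: alternative.

-- ===== PORT A =====
def is_foreign_key_name_py (name : String) : Bool :=
  (["id", "ID", "Id"].any fun endings =>
    ["-", "_", " "].any fun add => PySem.Str.endswith name (add ++ endings))
  || (["ID", "Id"].any fun endings => PySem.Str.endswith name endings)

-- ===== PORT B =====
-- States: 0 other, 1 separator, 2 'I', 3 sep+'i', 4 accept ID/Id, 5 accept sep+id
inductive FKState | q0 | qS | qI | qi | qD | qd
deriving DecidableEq, Repr

def fkStep (q : FKState) (c : Char) : FKState :=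
  if c = 'I' then .qI
  else if c = 'i' then (if q = .qS then .qi else .q0)
  else if c = '-' ∨ c = '_' ∨ c = ' ' then .qS
  else if c = 'D' then (if q = .qI then .qD else .q0)
  else if c = 'd' then (if q = .qI then .qD else if q = .qi then .qd else .q0)
  else .q0

def is_foreign_key_name_py_alt (name : String) : Bool :=
  let q := name.toList.foldl fkStep .q0
  decide (q = .qD) || decide (q = .qd)

-- ===== PRECONDITION & SPEC =====
def Spec_is_foreign_key_name_py (name : String) (out : Bool) : Prop := out = is_foreign_key_name_py_alt name
instance (name : String) (out : Bool) : Decidable (Spec_is_foreign_key_name_py name out) := by unfold Spec_is_foreign_key_name_py; infer_instance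

-- ===== CLAIM (what is proved, stated in full; the proofs are below) =====
def Claim_equal_is_foreign_key_name_py : Prop := ∀ (name : String), Dom_is_foreign_key_name_py name → Spec_is_foreign_key_name_py name (is_foreign_key_name_py name)

-- ===== LEMMAS AND PROOFS =====

-- character classes relevant to the DFA
inductive FKC | cI | ci | cs | cD | cd | co
deriving DecidableEq, Repr

def fkc (c : Char) : FKC :=
  if c = 'I' then .cI
  else if c = 'i' then .ci
  else if c = '-' ∨ c = '_' ∨ c = ' ' then .cs
  else if c = 'D' then .cD
  else if c = 'd' then .cd
  else .co

def fkStepC (q : FKState) (k : FKC) : FKState :=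
  match k with
  | .cI => .qI
  | .ci => if q = .qS then .qi else .q0
  | .cs => .qS
  | .cD => if q = .qI then .qD else .q0
  | .cd => if q = .qI then .qD else if q = .qi then .qd else .q0
  | .co => .q0

theorem fkStep_eq (q : FKState) (c : Char) : fkStep q c = fkStepC q (fkc c) := by
  unfold fkStep fkStepC fkc
  split_ifs <;> rfl

-- the DFA state as a function of the reversed class list (last chars first)
def fkSpecC : List FKC → FKState
  | [] => .q0
  | k1 :: rest =>
    match k1 with
    | .cI => .qI
    | .cs => .qS
    | _ =>
      match rest with
      | [] => .q0
      | k2 :: rest2 =>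
        if k1 = .ci then (if k2 = .cs then .qi else .q0)
        else if (k1 = .cD ∨ k1 = .cd) ∧ k2 = .cI then .qD
        else if k1 = .cd ∧ k2 = .ci then
          (match rest2 with
           | [] => .q0
           | k3 :: _ => if k3 = .cs then .qd else .q0)
        else .q0

theorem fkStepC_spec (r : List FKC) (k : FKC) :
    fkStepC (fkSpecC r) k = fkSpecC (k :: r) := by
  match r with
  | [] => cases k <;> rfl
  | [a] => cases k <;> cases a <;> rfl
  | [a, b] => cases k <;> cases a <;> cases b <;> rfl
  | a :: b :: c :: rest => cases k <;> cases a <;> cases b <;> cases c <;> rfl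

theorem fkFold_spec (l : List Char) :
    l.foldl fkStep .q0 = fkSpecC (l.reverse.map fkc) := by
  induction l using List.reverseRecOn with
  | nil => rfl
  | append_singleton l c ih =>
    rw [List.foldl_append, List.foldl_cons, List.foldl_nil, fkStep_eq, ih,
      List.reverse_append, fkStepC_spec]
    rfl

theorem endswith_rev (l p : List Char) :
    PySem.Chars.endswith l p = decide (p.reverse <+: l.reverse) := by
  cases hb : PySem.Chars.endswith l p
  · symm
    simp only [decide_eq_false_iff_not]
    intro hpre
    rw [List.reverse_prefix] at hpre
    have := (PySem.Chars.endswith_iff l p).mpr hpre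
    simp [hb] at this
  · symm
    rw [decide_eq_true_iff]
    exact List.reverse_prefix.mpr ((PySem.Chars.endswith_iff l p).mp hb)

theorem str_endswith_rev (s p : String) :
    PySem.Str.endswith s p = decide (p.toList.reverse <+: s.toList.reverse) := by
  rw [PySem.Str.endswith_eq, endswith_rev]

set_option maxRecDepth 8000 in
set_option maxHeartbeats 3200000 in
theorem key (s : String) :
    is_foreign_key_name_py s = is_foreign_key_name_py_alt s := by
  have hA : is_foreign_key_name_py s =
      (decide (['d','i','-'] <+: s.toList.reverse) || decide (['d','i','_'] <+: s.toList.reverse) ||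
       decide (['d','i',' '] <+: s.toList.reverse) || decide (['D','I','-'] <+: s.toList.reverse) ||
       decide (['D','I','_'] <+: s.toList.reverse) || decide (['D','I',' '] <+: s.toList.reverse) ||
       decide (['d','I','-'] <+: s.toList.reverse) || decide (['d','I','_'] <+: s.toList.reverse) ||
       decide (['d','I',' '] <+: s.toList.reverse) ||
       (decide (['D','I'] <+: s.toList.reverse) || decide (['d','I'] <+: s.toList.reverse))) := by
    simp only [is_foreign_key_name_py, List.any_cons, List.any_nil, str_endswith_rev,
      Bool.or_false, Bool.or_assoc]
    rfl
  rw [hA]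
  show _ = is_foreign_key_name_py_alt s
  unfold is_foreign_key_name_py_alt
  rw [fkFold_spec]
  match hr : s.toList.reverse with
  | [] => decide
  | [c1] =>
    by_cases h1 : c1 = 'I' <;> by_cases hs1 : c1 = '-' ∨ c1 = '_' ∨ c1 = ' ' <;>
      by_cases h1i : c1 = 'i' <;> by_cases h1D : c1 = 'D' <;> by_cases h1d : c1 = 'd' <;>
      simp_all [fkSpecC, fkc, List.cons_prefix_cons, @eq_comm Char] <;> (try split_ifs) <;>
      (try simp_all) <;> (try tauto)
  | [c1, c2] =>
    by_cases h1 : c1 = 'I' <;> by_cases hs1 : c1 = '-' ∨ c1 = '_' ∨ c1 = ' ' <;>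
      by_cases h1i : c1 = 'i' <;> by_cases h1D : c1 = 'D' <;> by_cases h1d : c1 = 'd' <;>
      by_cases h2 : c2 = 'I' <;> by_cases h2i : c2 = 'i' <;>
      by_cases hs2 : c2 = '-' ∨ c2 = '_' ∨ c2 = ' ' <;>
      simp_all [fkSpecC, fkc, List.cons_prefix_cons, @eq_comm Char] <;> (try split_ifs) <;>
      (try simp_all) <;> (try tauto)
  | c1 :: c2 :: c3 :: rest =>
    by_cases h1 : c1 = 'I' <;> by_cases hs1 : c1 = '-' ∨ c1 = '_' ∨ c1 = ' ' <;>
      by_cases h1i : c1 = 'i' <;> by_cases h1D : c1 = 'D' <;> by_cases h1d : c1 = 'd' <;>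
      by_cases h2 : c2 = 'I' <;> by_cases h2i : c2 = 'i' <;>
      by_cases hs2 : c2 = '-' ∨ c2 = '_' ∨ c2 = ' ' <;>
      by_cases hs3 : c3 = '-' ∨ c3 = '_' ∨ c3 = ' ' <;>
      simp_all [fkSpecC, fkc, List.cons_prefix_cons, @eq_comm Char] <;> (try split_ifs) <;>
      (try simp_all) <;> (try tauto)

-- ===== VERDICT (by name: the statement is the Claim_ definition above) =====
theorem is_foreign_key_name_py_spec : Claim_equal_is_foreign_key_name_py := by
  intro name _
  exact key name
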